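-- pv_equiv track=rewrite | github.com/xynova/repomap-tool | src/repomap_tool/code_analysis/density_analyzer.py | _map_tag_to_category
-- ===== SOURCE A (Python) =====
-- from typing import Dict, List, Optional
-- from enum import Enum
--
-- class IdentifierCategory(str, Enum):
--     """Categories for identifier classification"""
--
--     CLASSES = "classes"
--     FUNCTIONS = "functions"
--     METHODS = "methods"
--     VARIABLES = "variables"
--     IMPORTS = "imports"
--
-- def _map_tag_to_category(tag_kind: str) -> Optional[str]:
--     """Map tree-sitter tag kind to identifier category."""
--     kind_lower = tag_kind.lower()
--
--     # Classes, interfaces, enums, types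
--     if any(
--         x in kind_lower for x in ["class", "interface", "enum", "type", "record"]
--     ):
--         return IdentifierCategory.CLASSES
--
--     # Functions (top-level)
--     if "function" in kind_lower and "call" not in kind_lower:
--         if "method" not in kind_lower:
--             return IdentifierCategory.FUNCTIONS
--
--     # Methods (class members)
--     if "method" in kind_lower or "constructor" in kind_lower:
--         return IdentifierCategory.METHODS
--
--     if any(x in kind_lower for x in ["variable", "field", "property", "parameter"]):
--         if "call" not in kind_lower:  # Ensure 'call' is not categorized as variable
--             return IdentifierCategory.VARIABLES
--
--     if "import" in kind_lower or "require" in kind_lower or "export" in kind_lower: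
--         return IdentifierCategory.IMPORTS
--
--     return None
-- ===== SOURCE B (Python) =====
-- from typing import Optional
-- from enum import Enum
--
-- class IdentifierCategory(str, Enum):
--     """Categories for identifier classification"""
--
--     CLASSES = "classes"
--     FUNCTIONS = "functions"
--     METHODS = "methods"
--     VARIABLES = "variables"
--     IMPORTS = "imports"
--
-- _KEYWORDS = ("class", "interface", "enum", "type", "record",
--              "function", "call", "method", "constructor",
--              "variable", "field", "property", "parameter",
--              "import", "require", "export")
--
-- def _map_tag_to_category(tag_kind: str) -> Optional[str]:
--     """Single scan over the lowered string collecting keyword flags, then decide."""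
--     kind = tag_kind.lower()
--     found = set()
--     for i in range(len(kind)):
--         for kw in _KEYWORDS:
--             if kind.startswith(kw, i):
--                 found.add(kw)
--     if found & {"class", "interface", "enum", "type", "record"}:
--         return IdentifierCategory.CLASSES
--     if "function" in found and "call" not in found and "method" not in found:
--         return IdentifierCategory.FUNCTIONS
--     if "method" in found or "constructor" in found:
--         return IdentifierCategory.METHODS
--     if (found & {"variable", "field", "property", "parameter"}) and "call" not in found:
--         return IdentifierCategory.VARIABLES
--     if found & {"import", "require", "export"}:
--         return IdentifierCategory.IMPORTS
--     return None
-- ===== Notes on version B (the rewrite author's own statement) =====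
-- stated objective: alternative
-- what changed: Instead of A's cascade of independent substring searches, B makes one left-to-right scan over the lowered string, collecting at each offset which keywords start there into a set of flags, and then decides the category purely from that flag set.
import Mathlib
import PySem

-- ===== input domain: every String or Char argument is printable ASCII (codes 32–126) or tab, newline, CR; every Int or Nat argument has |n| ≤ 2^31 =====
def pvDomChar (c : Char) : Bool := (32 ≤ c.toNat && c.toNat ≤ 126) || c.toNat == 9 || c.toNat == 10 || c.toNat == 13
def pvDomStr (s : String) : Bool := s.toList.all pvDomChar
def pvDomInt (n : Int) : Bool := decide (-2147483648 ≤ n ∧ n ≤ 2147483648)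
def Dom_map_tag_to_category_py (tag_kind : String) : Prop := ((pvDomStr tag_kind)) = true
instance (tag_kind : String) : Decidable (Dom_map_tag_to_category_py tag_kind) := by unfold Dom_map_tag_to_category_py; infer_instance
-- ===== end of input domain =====

-- B replaces A's cascade of independent substring searches by one left-to-right scan over
-- the lowered string that collects keyword flags into a set, then decides from the flags
-- (objective: alternative, same cost).

-- ===== PORT A =====
def map_tag_to_category_py (tag_kind : String) : Option String :=
  let kind_lower := PySem.Str.lower tag_kind
  if ["class", "interface", "enum", "type", "record"].any
      (fun x => PySem.Str.isIn x kind_lower) then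
    some "classes"
  else if PySem.Str.isIn "function" kind_lower && !PySem.Str.isIn "call" kind_lower then
    if !PySem.Str.isIn "method" kind_lower then
      some "functions"
    else if PySem.Str.isIn "method" kind_lower || PySem.Str.isIn "constructor" kind_lower then
      some "methods"
    else if ["variable", "field", "property", "parameter"].any
        (fun x => PySem.Str.isIn x kind_lower) then
      if !PySem.Str.isIn "call" kind_lower then some "variables"
      else if PySem.Str.isIn "import" kind_lower || PySem.Str.isIn "require" kind_lower
          || PySem.Str.isIn "export" kind_lower then some "imports" else none
    else if PySem.Str.isIn "import" kind_lower || PySem.Str.isIn "require" kind_lower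
        || PySem.Str.isIn "export" kind_lower then some "imports" else none
  else if PySem.Str.isIn "method" kind_lower || PySem.Str.isIn "constructor" kind_lower then
    some "methods"
  else if ["variable", "field", "property", "parameter"].any
      (fun x => PySem.Str.isIn x kind_lower) then
    if !PySem.Str.isIn "call" kind_lower then some "variables"
    else if PySem.Str.isIn "import" kind_lower || PySem.Str.isIn "require" kind_lower
        || PySem.Str.isIn "export" kind_lower then some "imports" else none
  else if PySem.Str.isIn "import" kind_lower || PySem.Str.isIn "require" kind_lower
      || PySem.Str.isIn "export" kind_lower then some "imports" else none

-- ===== PORT B =====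
def pvKeywords : List String :=
  ["class", "interface", "enum", "type", "record",
   "function", "call", "method", "constructor",
   "variable", "field", "property", "parameter",
   "import", "require", "export"]

-- the scan loop of Source B: for i in range(len(kind)): for kw in _KEYWORDS: if kind.startswith(kw, i): found.add(kw)
-- (kind.startswith(kw, i) with 0 ≤ i is exact as: kw.toList is a prefix of kind.drop i)
def pvFound (kind : List Char) : PySem.Set String :=
  (PySem.List.pyRange 0 (kind.length : Int) 1).foldl (fun found i =>
    pvKeywords.foldl (fun found kw =>
      if PySem.Chars.startswith (kind.drop i.toNat) kw.toList then PySem.Set.add found kw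
      else found) found) PySem.Set.empty

def map_tag_to_category_py_alt (tag_kind : String) : Option String :=
  let kind := (PySem.Str.lower tag_kind).toList
  let found := pvFound kind
  let has := fun kw => PySem.Set.contains found kw
  if has "class" || has "interface" || has "enum" || has "type" || has "record" then
    some "classes"
  else if has "function" && !has "call" && !has "method" then
    some "functions"
  else if has "method" || has "constructor" then
    some "methods"
  else if (has "variable" || has "field" || has "property" || has "parameter") && !has "call" then
    some "variables"
  else if has "import" || has "require" || has "export" then
    some "imports"
  else none

-- ===== PRECONDITION & SPEC =====
def Spec_map_tag_to_category_py (tag_kind : String) (out : Option String) : Prop := out = map_tag_to_category_py_alt tag_kind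
instance (tag_kind : String) (out : Option String) : Decidable (Spec_map_tag_to_category_py tag_kind out) := by unfold Spec_map_tag_to_category_py; infer_instance

-- ===== CLAIM (what is proved, stated in full; the proofs are below) =====
def Claim_equal_map_tag_to_category_py : Prop := ∀ (tag_kind : String), Dom_map_tag_to_category_py tag_kind → Spec_map_tag_to_category_py tag_kind (map_tag_to_category_py tag_kind)

-- ===== LEMMAS AND PROOFS =====

-- membership in the inner fold (over the keyword list)
theorem pv_mem_inner (p : String → Bool) (ks : List String) (s : PySem.Set String) (x : String) :
    x ∈ ks.foldl (fun s k => if p k then PySem.Set.add s k else s) s ↔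
      x ∈ s ∨ (x ∈ ks ∧ p x = true) := by
  induction ks generalizing s with
  | nil => simp [List.foldl]
  | cons k ks ih =>
    simp only [List.foldl, ih, List.mem_cons]
    by_cases hk : p k = true
    · rw [if_pos hk]
      rw [PySem.Set.mem_add]
      constructor
      · rintro (⟨hs | he⟩ | ⟨hm, hp⟩)
        · exact Or.inl hs
        · exact Or.inr ⟨Or.inl he, he ▸ hk⟩
        · exact Or.inr ⟨Or.inr hm, hp⟩
      · rintro (hs | ⟨(he | hm), hp⟩)
        · exact Or.inl (Or.inl hs)
        · exact Or.inl (Or.inr he)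
        · exact Or.inr ⟨hm, hp⟩
    · rw [if_neg hk]
      constructor
      · rintro (hs | ⟨hm, hp⟩)
        · exact Or.inl hs
        · exact Or.inr ⟨Or.inr hm, hp⟩
      · rintro (hs | ⟨(he | hm), hp⟩)
        · exact Or.inl hs
        · exact absurd (he ▸ hp) hk
        · exact Or.inr ⟨hm, hp⟩

-- membership in the outer fold (over the position list)
theorem pv_mem_outer (q : Int → String → Bool) (ks : List String) (l : List Int)
    (s : PySem.Set String) (x : String) :
    x ∈ l.foldl (fun s i => ks.foldl (fun s k => if q i k then PySem.Set.add s k else s) s) s ↔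
      x ∈ s ∨ (x ∈ ks ∧ ∃ i ∈ l, q i x = true) := by
  induction l generalizing s with
  | nil => simp [List.foldl]
  | cons i l ih =>
    simp only [List.foldl, ih, pv_mem_inner, List.mem_cons]
    constructor
    · rintro ((hs | ⟨hm, hp⟩) | ⟨hm, j, hj, hq⟩)
      · exact Or.inl hs
      · exact Or.inr ⟨hm, i, Or.inl rfl, hp⟩
      · exact Or.inr ⟨hm, j, Or.inr hj, hq⟩
    · rintro (hs | ⟨hm, j, (hj | hj), hq⟩)
      · exact Or.inl (Or.inl hs)
      · exact Or.inl (Or.inr ⟨hm, hj ▸ hq⟩)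
      · exact Or.inr ⟨hm, j, hj, hq⟩

-- the scanned flag for a nonempty keyword is exactly Python's 'kw in kind'
theorem pv_has_eq (kind : List Char) (kw : String) (hk : kw ∈ pvKeywords)
    (hne : kw.toList ≠ []) :
    PySem.Set.contains (pvFound kind) kw = PySem.Chars.isIn kw.toList kind := by
  have hmem : kw ∈ pvFound kind ↔
      ∃ i ∈ PySem.List.pyRange 0 (kind.length : Int) 1,
        PySem.Chars.startswith (kind.drop i.toNat) kw.toList = true := by
    rw [pvFound, pv_mem_outer]
    simp [PySem.Set.empty, hk]
  have hiff : kw ∈ pvFound kind ↔ PySem.Chars.isIn kw.toList kind = true := by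
    rw [hmem, ← PySem.Chars.exists_prefix_drop_iff_isIn]
    constructor
    · rintro ⟨i, _, hsw⟩
      exact ⟨i.toNat, (PySem.Chars.startswith_iff _ _).mp hsw⟩
    · rintro ⟨j, hpre⟩
      have hjlt : j < kind.length := by
        rcases Nat.lt_or_ge j kind.length with h | hge
        · exact h
        · rw [List.drop_eq_nil_of_le hge] at hpre
          exact absurd (List.prefix_nil.mp hpre) hne
      refine ⟨(j : Int), ?_, ?_⟩
      · rw [PySem.List.mem_pyRange_one]
        constructor
        · exact Int.natCast_nonneg j
        · exact_mod_cast hjlt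
      · rw [PySem.Chars.startswith_iff]
        simpa using hpre
  have hcm : PySem.Set.contains (pvFound kind) kw = true ↔ kw ∈ pvFound kind := by
    simp [PySem.Set.contains]
  rcases h : PySem.Chars.isIn kw.toList kind with _ | _
  · rw [← Bool.not_eq_true, hcm, hiff, h]
    simp
  · rw [hcm, hiff, h]

-- B's decision step, as a function of an abstract flag map g
def pvDecide (g : String → Bool) : Option String :=
  if g "class" || g "interface" || g "enum" || g "type" || g "record" then some "classes"
  else if g "function" && !g "call" && !g "method" then some "functions"
  else if g "method" || g "constructor" then some "methods"
  else if (g "variable" || g "field" || g "property" || g "parameter") && !g "call" then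
    some "variables"
  else if g "import" || g "require" || g "export" then some "imports"
  else none

-- B's port computes pvDecide of the real substring tests
set_option maxHeartbeats 1000000 in
theorem pv_alt_eq (t : String) :
    map_tag_to_category_py_alt t = pvDecide (fun x => PySem.Str.isIn x (PySem.Str.lower t)) := by
  simp only [map_tag_to_category_py_alt, pvDecide]
  simp only [pv_has_eq _ "class" (by decide) (by decide),
      pv_has_eq _ "interface" (by decide) (by decide),
      pv_has_eq _ "enum" (by decide) (by decide),
      pv_has_eq _ "type" (by decide) (by decide),
      pv_has_eq _ "record" (by decide) (by decide),
      pv_has_eq _ "function" (by decide) (by decide),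
      pv_has_eq _ "call" (by decide) (by decide),
      pv_has_eq _ "method" (by decide) (by decide),
      pv_has_eq _ "constructor" (by decide) (by decide),
      pv_has_eq _ "variable" (by decide) (by decide),
      pv_has_eq _ "field" (by decide) (by decide),
      pv_has_eq _ "property" (by decide) (by decide),
      pv_has_eq _ "parameter" (by decide) (by decide),
      pv_has_eq _ "import" (by decide) (by decide),
      pv_has_eq _ "require" (by decide) (by decide),
      pv_has_eq _ "export" (by decide) (by decide)]
  rfl

-- A's case tree computes the same value as pvDecide, for any flag map g
set_option maxHeartbeats 1000000 in
theorem pv_cascade_eq_decide (g : String → Bool) :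
    (if ["class", "interface", "enum", "type", "record"].any g then some "classes"
      else if g "function" && !g "call" then
        if !g "method" then some "functions"
        else if g "method" || g "constructor" then some "methods"
        else if ["variable", "field", "property", "parameter"].any g then
          if !g "call" then some "variables"
          else if g "import" || g "require" || g "export" then some "imports" else none
        else if g "import" || g "require" || g "export" then some "imports" else none
      else if g "method" || g "constructor" then some "methods"
      else if ["variable", "field", "property", "parameter"].any g then
        if !g "call" then some "variables"
        else if g "import" || g "require" || g "export" then some "imports" else none
      else if g "import" || g "require" || g "export" then some "imports" else none)
    = pvDecide g := by
  simp only [pvDecide, List.any_cons, List.any_nil, Bool.or_false, Bool.or_assoc]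
  cases h1 : (g "class" || (g "interface" || (g "enum" || (g "type" || g "record")))) <;>
  cases hf : g "function" <;> cases hca : g "call" <;> cases hm : g "method" <;>
  cases hco : g "constructor" <;>
  cases h6 : (g "variable" || (g "field" || (g "property" || g "parameter"))) <;>
  cases h7 : (g "import" || (g "require" || g "export")) <;> rfl

-- ===== VERDICT (by name: the statement is the Claim_ definition above) =====
theorem map_tag_to_category_py_spec : Claim_equal_map_tag_to_category_py := by
  intro t _
  unfold Spec_map_tag_to_category_py
  rw [pv_alt_eq]
  exact pv_cascade_eq_decide (fun x => PySem.Str.isIn x (PySem.Str.lower t))
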